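-- pv_equiv track=rewrite | github.com/sharma6503/100DaysofCode-Python | 90.Make The String Great.py | great_string
-- ===== SOURCE A (Python) =====
-- def great_string(s):
--     great_chars=[]
--     for i in s:
--         if great_chars and abs(ord(i)-ord(great_chars[-1]))==32:
--             great_chars.pop(-1)
--         else:
--             great_chars.append(i)
--     return ''.join(great_chars)
-- ===== SOURCE B (Python) =====
-- def great_string(s):
--     t = s
--     while True:
--         for i in range(len(t) - 1):
--             if abs(ord(t[i]) - ord(t[i + 1])) == 32:
--                 t = t[:i] + t[i + 2:]
--                 break
--         else:
--             return t
-- ===== Notes on version B (the rewrite author's own statement) =====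
-- stated objective: alternative
-- what changed: Replaced the single-pass stack accumulation with a fixed-point loop that repeatedly scans for the first adjacent pair with abs(ord difference) == 32 and splices it out until a full pass finds none.
import Mathlib
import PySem

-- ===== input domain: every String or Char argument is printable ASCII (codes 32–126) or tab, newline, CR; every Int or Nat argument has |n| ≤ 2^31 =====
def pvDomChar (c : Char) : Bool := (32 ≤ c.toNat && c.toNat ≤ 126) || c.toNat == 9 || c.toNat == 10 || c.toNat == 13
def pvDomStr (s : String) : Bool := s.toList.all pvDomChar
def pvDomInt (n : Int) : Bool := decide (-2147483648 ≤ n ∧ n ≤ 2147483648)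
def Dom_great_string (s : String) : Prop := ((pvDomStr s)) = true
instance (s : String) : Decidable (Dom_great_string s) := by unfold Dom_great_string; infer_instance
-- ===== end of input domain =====

-- B replaces A's one-pass stack with a fixed-point repeated scan that splices out the first
-- adjacent case-paired characters until none remains (objective: alternative, not faster).

-- abs(ord(x) - ord(y)) == 32
def pvBad (x y : Char) : Bool := ((x.toNat : Int) - (y.toNat : Int)).natAbs == 32

-- ===== PORT A =====
-- one iteration of A's for-loop body over the stack
def pvStepA (st : List Char) (c : Char) : List Char :=
  match st.getLast? with
  | some t => if pvBad c t then st.dropLast else st ++ [c]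
  | none => [c]

def great_string (s : String) : String :=
  String.ofList (List.foldl pvStepA [] s.toList)

-- ===== PORT B =====
-- the inner for-scan of Source B: first adjacent bad pair spliced out, none if a full pass finds none
def pvSplice1 : List Char → Option (List Char)
  | a :: b :: rest => if pvBad a b then some rest else (pvSplice1 (b :: rest)).map (a :: ·)
  | _ => none

theorem pvSplice1_length : ∀ (l l' : List Char), pvSplice1 l = some l' → l'.length + 2 = l.length := by
  intro l
  induction l with
  | nil => intro l' h; simp [pvSplice1] at h
  | cons a t ih =>
    match t with
    | [] => intro l' h; simp [pvSplice1] at h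
    | b :: rest =>
      intro l' h
      by_cases hb : pvBad a b = true
      · simp [pvSplice1, hb] at h; subst h; simp
      · simp [pvSplice1, hb] at h
        obtain ⟨m, hm, hl'⟩ := h
        have := ih m hm
        subst hl'
        simp at this ⊢
        omega

-- the outer while-loop of Source B
def pvReduce (l : List Char) : List Char :=
  match h : pvSplice1 l with
  | some l' => pvReduce l'
  | none => l
termination_by l.length
decreasing_by
  have := pvSplice1_length l l' h
  omega

def great_string_alt (s : String) : String :=
  String.ofList (pvReduce s.toList)

-- ===== PRECONDITION & SPEC =====
def Spec_great_string (s : String) (out : String) : Prop := out = great_string_alt s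
instance (s : String) (out : String) : Decidable (Spec_great_string s out) := by unfold Spec_great_string; infer_instance

-- ===== CLAIM (what is proved, stated in full; the proofs are below) =====
def Claim_equal_great_string : Prop := ∀ (s : String), Dom_great_string s → Spec_great_string s (great_string s)

-- ===== LEMMAS AND PROOFS =====

theorem pvBad_comm (x y : Char) : pvBad x y = pvBad y x := by
  have h : ((x.toNat : Int) - (y.toNat : Int)).natAbs = ((y.toNat : Int) - (x.toNat : Int)).natAbs := by
    omega
  simp only [pvBad, h]

-- "no adjacent bad pair" predicate
def pvNB (l : List Char) : Prop := l.IsChain (fun x y => pvBad x y = false)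

theorem pvSplice1_none : ∀ {l : List Char}, pvSplice1 l = none → pvNB l := by
  intro l
  induction l with
  | nil => intro _; exact List.IsChain.nil
  | cons a t ih =>
    match t with
    | [] => intro _; exact List.isChain_singleton ..
    | b :: rest =>
      intro h
      by_cases hb : pvBad a b = true
      · simp [pvSplice1, hb] at h
      · simp only [pvSplice1, hb] at h
        simp at h hb
        exact (ih h).cons (by simpa using hb)

-- if st ++ l has no adjacent bad pair, A's loop just appends everything
theorem pvFold_nb : ∀ (l st : List Char), pvNB (st ++ l) → List.foldl pvStepA st l = st ++ l := by
  intro l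
  induction l with
  | nil => intro st _; simp
  | cons c rest ih =>
    intro st h
    have hstep : pvStepA st c = st ++ [c] := by
      match hst : st.getLast? with
      | none =>
        have : st = [] := by cases st <;> simp_all
        simp [pvStepA, hst, this]
      | some t =>
        have hmem : pvBad t c = false := by
          unfold pvNB at h
          rw [List.isChain_append] at h
          exact h.2.2 t hst c (by simp)
        rw [pvBad_comm] at hmem
        simp [pvStepA, hst, hmem]
    show List.foldl pvStepA (pvStepA st c) rest = st ++ c :: rest
    rw [hstep]
    have : pvNB ((st ++ [c]) ++ rest) := by simpa using h
    simpa using ih (st ++ [c]) this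

-- key lemma: one splice does not change A's result, given a clean stack boundary
theorem pvFold_splice : ∀ (l l' st : List Char), pvSplice1 l = some l' →
    pvNB (st ++ l.take 1) → List.foldl pvStepA st l = List.foldl pvStepA st l' := by
  intro l
  induction l with
  | nil => intro l' st h; simp [pvSplice1] at h
  | cons a t ih =>
    match t with
    | [] => intro l' st h; simp [pvSplice1] at h
    | b :: rest =>
      intro l' st h hnb
      simp only [List.take] at hnb
      -- step st a = st ++ [a] because the boundary (last st, a) is not bad
      have hstep : pvStepA st a = st ++ [a] := by
        match hst : st.getLast? with
        | none =>
          have : st = [] := by cases st <;> simp_all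
          simp [pvStepA, hst, this]
        | some t0 =>
          have hmem : pvBad t0 a = false := by
            unfold pvNB at hnb
            rw [List.isChain_append] at hnb
            exact hnb.2.2 t0 hst a (by simp)
          rw [pvBad_comm] at hmem
          simp [pvStepA, hst, hmem]
      by_cases hb : pvBad a b = true
      · -- splice removes a,b here: l' = rest
        simp [pvSplice1, hb] at h
        subst h
        show List.foldl pvStepA (pvStepA (pvStepA st a) b) rest = List.foldl pvStepA st rest
        rw [hstep]
        have hpop : pvStepA (st ++ [a]) b = st := by
          have hba : pvBad b a = true := by rw [pvBad_comm]; exact hb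
          simp [pvStepA, hba]
        rw [hpop]
      · -- splice happens further right: l' = a :: m
        simp only [pvSplice1, hb, if_neg, Bool.not_eq_true] at h
        simp only [Option.map_eq_some_iff] at h
        obtain ⟨m, hm, hl'⟩ := h
        subst hl'
        show List.foldl pvStepA (pvStepA st a) (b :: rest) =
          List.foldl pvStepA (pvStepA st a) m
        rw [hstep]
        apply ih m (st ++ [a]) hm
        -- pvNB ((st ++ [a]) ++ [b])
        unfold pvNB at hnb ⊢
        simp only [List.take]
        rw [List.isChain_append] at hnb ⊢
        refine ⟨?_, List.isChain_singleton .., ?_⟩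
        · rw [List.isChain_append]
          exact ⟨hnb.1, List.isChain_singleton .., hnb.2.2⟩
        · intro x hx y hy
          simp at hx hy
          subst hx; subst hy
          simpa using hb

theorem pvFold_eq_reduce : ∀ (l : List Char), List.foldl pvStepA [] l = pvReduce l := by
  intro l
  induction l using pvReduce.induct with
  | case1 l l' hsp ih =>
    rw [pvReduce]
    split
    · next m hm =>
      have hml' : m = l' := by rw [hsp] at hm; exact (Option.some.injEq _ _ ▸ hm.symm)
      subst hml'
      rw [← ih]
      exact pvFold_splice l m [] hsp (by
        unfold pvNB
        match l with
        | [] => exact List.IsChain.nil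
        | c :: t => exact List.isChain_singleton ..)
    · next hm => rw [hsp] at hm; cases hm
  | case2 l hsp =>
    rw [pvReduce]
    split
    · next m hm => rw [hsp] at hm; cases hm
    · next _ => exact pvFold_nb l [] (pvSplice1_none hsp)

-- ===== VERDICT (by name: the statement is the Claim_ definition above) =====
theorem great_string_spec : Claim_equal_great_string := by
  intro s _
  show String.ofList (List.foldl pvStepA [] s.toList) = String.ofList (pvReduce s.toList)
  rw [pvFold_eq_reduce]
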